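-- pv_equiv track=rewrite | github.com/Kacper-Lechicki/udemy_sage | src/udemy_sage/renderer.py | _yaml_double_quoted
-- ===== SOURCE A (Python) =====
-- def _yaml_double_quoted(s: str) -> str:
--     """YAML double-quoted string; escapes quotes, backslashes, newlines."""
--     parts: list[str] = ['"']
--     for ch in s:
--         if ch == "\\":
--             parts.append("\\\\")
--         elif ch == '"':
--             parts.append('\\"')
--         elif ch == "\n":
--             parts.append("\\n")
--         elif ch == "\r":
--             parts.append("\\r")
--         else:
--             parts.append(ch)
--     parts.append('"')
--     return "".join(parts)
-- ===== SOURCE B (Python) =====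
-- def _yaml_double_quoted(s: str) -> str:
--     """YAML double-quoted string; escapes quotes, backslashes, newlines."""
--     body = (s.replace("\\", "\\\\")
--              .replace('"', '\\"')
--              .replace("\n", "\\n")
--              .replace("\r", "\\r"))
--     return '"' + body + '"'
-- ===== Notes on version B (the rewrite author's own statement) =====
-- stated objective: faster
-- what changed: Replaced the per-character Python loop building a list of parts with a chain of four str.replace passes (backslash first, so later escapes are not re-escaped), concatenating the surrounding quotes; the replaces run in C, removing the per-character interpreter overhead.
import Mathlib
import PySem

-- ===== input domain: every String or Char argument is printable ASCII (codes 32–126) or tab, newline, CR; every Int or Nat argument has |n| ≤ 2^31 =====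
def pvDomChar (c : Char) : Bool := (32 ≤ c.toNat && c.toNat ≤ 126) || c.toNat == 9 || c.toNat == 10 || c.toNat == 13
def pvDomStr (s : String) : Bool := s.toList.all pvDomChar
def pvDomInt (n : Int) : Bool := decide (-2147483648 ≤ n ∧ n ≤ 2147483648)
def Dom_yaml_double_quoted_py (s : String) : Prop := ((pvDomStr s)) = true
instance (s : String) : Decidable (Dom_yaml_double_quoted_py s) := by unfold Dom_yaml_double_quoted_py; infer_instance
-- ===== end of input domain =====

-- B replaces A's per-character loop with a chain of str.replace passes (backslash first); constant-factor faster (measured) since the scans run in C.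

-- ===== PORT A =====
def yaml_double_quoted_py (s : String) : String :=
  let parts : List String :=
    s.toList.foldl (fun parts ch =>
      if ch == '\\' then parts ++ ["\\\\"]
      else if ch == '"' then parts ++ ["\\\""]
      else if ch == '\n' then parts ++ ["\\n"]
      else if ch == '\r' then parts ++ ["\\r"]
      else parts ++ [String.ofList [ch]]) ["\""]
  PySem.Str.join "" (parts ++ ["\""])

-- ===== PORT B =====
def yaml_double_quoted_py_alt (s : String) : String :=
  let body :=
    PySem.Str.replace
      (PySem.Str.replace
        (PySem.Str.replace
          (PySem.Str.replace s "\\" "\\\\")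
          "\"" "\\\"")
        "\n" "\\n")
      "\r" "\\r"
  "\"" ++ body ++ "\""

-- ===== PRECONDITION & SPEC =====
def Spec_yaml_double_quoted_py (s : String) (out : String) : Prop := out = yaml_double_quoted_py_alt s
instance (s : String) (out : String) : Decidable (Spec_yaml_double_quoted_py s out) := by unfold Spec_yaml_double_quoted_py; infer_instance

-- ===== CLAIM (what is proved, stated in full; the proofs are below) =====
def Claim_equal_yaml_double_quoted_py : Prop := ∀ (s : String), Dom_yaml_double_quoted_py s → Spec_yaml_double_quoted_py s (yaml_double_quoted_py s)

-- ===== LEMMAS AND PROOFS =====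

-- A's per-character escape, as a list of characters
def pvEscA (ch : Char) : List Char :=
  if ch == '\\' then ['\\', '\\']
  else if ch == '"' then ['\\', '"']
  else if ch == '\n' then ['\\', 'n']
  else if ch == '\r' then ['\\', 'r']
  else [ch]

-- single-character replace as flatMap
def pvRep (o : Char) (new : List Char) (c : Char) : List Char :=
  if c = o then new else [c]

lemma replace_go_single (o : Char) (new : List Char) :
    ∀ (l : List Char) (fuel : Nat) (acc : List Char), l.length ≤ fuel →
      PySem.Chars.replace.go [o] new fuel l acc
        = acc.reverse ++ l.flatMap (pvRep o new) := by
  intro l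
  induction l with
  | nil =>
      intro fuel acc _
      cases fuel <;> simp [PySem.Chars.replace.go]
  | cons c t ih =>
      intro fuel acc hle
      cases fuel with
      | zero => simp at hle
      | succ n =>
          by_cases h : c = o
          · subst h
            have : List.isPrefixOf [c] (c :: t) = true := by
              simp [List.isPrefixOf]
            rw [PySem.Chars.replace.go]
            simp only [this, if_pos]
            rw [show List.drop [c].length (c :: t) = t from rfl]
            rw [ih n (new.reverse ++ acc) (by simpa using Nat.le_of_succ_le_succ hle)]
            simp [pvRep]
          · have hpre : List.isPrefixOf [o] (c :: t) = false := by
              simp [List.isPrefixOf]; exact fun hco => absurd hco.symm h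
            rw [PySem.Chars.replace.go]
            simp only [hpre]
            rw [if_neg (by simp)]
            rw [ih n (c :: acc) (by simpa using Nat.le_of_succ_le_succ hle)]
            simp [pvRep, h]

lemma replace_single (s : List Char) (o : Char) (new : List Char) :
    PySem.Chars.replace s [o] new = s.flatMap (pvRep o new) := by
  rw [PySem.Chars.replace]
  simp only [List.isEmpty_cons, Bool.false_eq_true, if_false]
  simpa using replace_go_single o new s s.length [] le_rfl

lemma foldl_append_map {α β : Type} (g : α → β) :
    ∀ (l : List α) (init : List β),
      l.foldl (fun acc c => acc ++ [g c]) init = init ++ l.map g := by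
  intro l
  induction l with
  | nil => simp
  | cons c t ih => intro init; simp [List.foldl, ih]

lemma intercalate_nil_char (l : List (List Char)) :
    List.intercalate ([] : List Char) l = l.flatten := by
  induction l with
  | nil => simp [List.intercalate]
  | cons a t ih =>
      cases t with
      | nil => simp [List.intercalate]
      | cons b u =>
          simp only [List.intercalate] at ih ⊢
          simp [List.intersperse, List.flatten] at ih ⊢
          exact ih

-- pointwise: composing the four single-character replaces equals A's escape
lemma pointwise (c : Char) :
    (((pvRep '\\' ['\\', '\\'] c).flatMap (pvRep '"' ['\\', '"'])).flatMap
        (pvRep '\n' ['\\', 'n'])).flatMap (pvRep '\r' ['\\', 'r'])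
      = pvEscA c := by
  by_cases h1 : c = '\\'
  · subst h1; decide
  by_cases h2 : c = '"'
  · subst h2; decide
  by_cases h3 : c = '\n'
  · subst h3; decide
  by_cases h4 : c = '\r'
  · subst h4; decide
  · simp [pvRep, pvEscA, h1, h2, h3, h4]

def pvEscAStr (ch : Char) : String :=
  if ch == '\\' then "\\\\"
  else if ch == '"' then "\\\""
  else if ch == '\n' then "\\n"
  else if ch == '\r' then "\\r"
  else String.ofList [ch]

lemma toList_escAStr (c : Char) : (pvEscAStr c).toList = pvEscA c := by
  unfold pvEscAStr pvEscA
  split_ifs <;> first | rfl | simp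

lemma fold_fun_eq :
    (fun (parts : List String) ch =>
      if ch == '\\' then parts ++ ["\\\\"]
      else if ch == '"' then parts ++ ["\\\""]
      else if ch == '\n' then parts ++ ["\\n"]
      else if ch == '\r' then parts ++ ["\\r"]
      else parts ++ [String.ofList [ch]])
      = fun parts ch => parts ++ [pvEscAStr ch] := by
  funext p c
  unfold pvEscAStr
  split_ifs <;> rfl

lemma toList_A (s : String) :
    (yaml_double_quoted_py s).toList = '"' :: s.toList.flatMap pvEscA ++ ['"'] := by
  unfold yaml_double_quoted_py
  rw [fold_fun_eq, foldl_append_map]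
  show (PySem.Str.join "" ((["\""] ++ s.toList.map pvEscAStr) ++ ["\""])).toList = _
  rw [PySem.Str.toList_join]
  simp only [PySem.Chars.join, show ("" : String).toList = [] from rfl]
  rw [intercalate_nil_char]
  simp only [List.map_append, List.map_map, List.flatten_append, List.flatten_cons,
    List.flatten_nil, List.map_cons, List.map_nil]
  rw [show (List.map (String.toList ∘ pvEscAStr) s.toList).flatten
        = s.toList.flatMap (fun c => (pvEscAStr c).toList) by
      simp [List.flatMap_def, Function.comp_def]]
  simp only [toList_escAStr]
  rfl

lemma chain_eq (l : List Char) :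
    (((l.flatMap (pvRep '\\' ['\\','\\'])).flatMap (pvRep '"' ['\\','"'])).flatMap
        (pvRep '\n' ['\\','n'])).flatMap (pvRep '\r' ['\\','r']) = l.flatMap pvEscA := by
  induction l with
  | nil => rfl
  | cons c t ih =>
      simp only [List.flatMap_cons, List.flatMap_append, ih]
      rw [pointwise c]

lemma toList_B (s : String) :
    (yaml_double_quoted_py_alt s).toList = '"' :: s.toList.flatMap pvEscA ++ ['"'] := by
  unfold yaml_double_quoted_py_alt
  simp only [String.toList_append, PySem.Str.toList_replace]
  rw [show ("\\" : String).toList = ['\\'] from rfl,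
      show ("\\\\" : String).toList = ['\\','\\'] from rfl,
      show ("\"" : String).toList = ['"'] from rfl,
      show ("\\\"" : String).toList = ['\\','"'] from rfl,
      show ("\n" : String).toList = ['\n'] from rfl,
      show ("\\n" : String).toList = ['\\','n'] from rfl,
      show ("\r" : String).toList = ['\r'] from rfl,
      show ("\\r" : String).toList = ['\\','r'] from rfl]
  rw [replace_single, replace_single, replace_single, replace_single]
  rw [chain_eq]
  rfl

-- ===== VERDICT (by name: the statement is the Claim_ definition above) =====
theorem yaml_double_quoted_py_spec : Claim_equal_yaml_double_quoted_py := by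
  intro s _
  unfold Spec_yaml_double_quoted_py
  rw [← String.toList_inj, toList_A, toList_B]
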